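-- pv_equiv track=rewrite | github.com/mrishab/Comp382_Assignment2 | src/comp382_assignment_2/matchers/regular_languages.py | regex_a_b_star_a_matcher
-- ===== SOURCE A (Python) =====
-- def regex_a_b_star_a_matcher(input_str: str) -> str:
--     """
--     Regular: a ◦ b* ◦ a - returns LONGEST matching substring
--     Finds patterns like 'aa', 'aba', 'abba', etc.
--     Fixed to find 'aba' in 'abcba'
--     """
--     if not input_str:
--         return ""
--
--     # More robust pattern: find any 'a' followed by any characters? No, must be only b's in between
--     # We need to find all substrings that match a(b*)a
--     n = len(input_str)
--     best = ""
--
--     for i in range(n):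
--         if input_str[i] != 'a':
--             continue
--         for j in range(i + 1, n):
--             if input_str[j] != 'a':
--                 continue
--             # Check if all characters between i and j are 'b'
--             valid = True
--             for k in range(i + 1, j):
--                 if input_str[k] != 'b':
--                     valid = False
--                     break
--             if valid:
--                 candidate = input_str[i:j+1]
--                 if len(candidate) > len(best):
--                     best = candidate
--
--     return best
-- ===== SOURCE B (Python) =====
-- def regex_a_b_star_a_matcher(input_str: str) -> str:
--     # One linear scan: remember the last 'a' that is followed only by 'b's so far;
--     # each new 'a' closes a candidate match with that remembered 'a'.
--     best = (0, 0)   # (length, start) of the best match so far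
--     start = None    # index of the last 'a' with only 'b's since it, if any
--     for j, c in enumerate(input_str):
--         if c == 'a':
--             if start is not None and j - start + 1 > best[0]:
--                 best = (j - start + 1, start)
--             start = j
--         elif c != 'b':
--             start = None
--     length, s = best
--     return input_str[s:s + length]
-- ===== Notes on version B (the rewrite author's own statement) =====
-- stated objective: faster
-- what changed: Replaced A's cubic triple loop (every pair of 'a' positions re-scanned for intermediate 'b's) by a single left-to-right scan that remembers the last 'a' followed only by 'b's and closes a candidate at each new 'a'.
import Mathlib
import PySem

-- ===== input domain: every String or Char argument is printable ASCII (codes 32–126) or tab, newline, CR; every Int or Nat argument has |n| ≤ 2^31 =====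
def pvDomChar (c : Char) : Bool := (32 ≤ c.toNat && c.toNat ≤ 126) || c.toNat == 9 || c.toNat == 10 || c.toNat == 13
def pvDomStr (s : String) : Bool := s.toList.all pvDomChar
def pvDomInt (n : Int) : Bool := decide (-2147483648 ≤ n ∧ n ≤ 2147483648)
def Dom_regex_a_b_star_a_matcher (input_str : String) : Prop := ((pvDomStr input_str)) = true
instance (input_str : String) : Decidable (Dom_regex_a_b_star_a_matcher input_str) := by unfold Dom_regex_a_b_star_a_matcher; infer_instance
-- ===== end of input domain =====

-- B replaces A's cubic triple loop by a single linear scan that remembers the last 'a'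
-- followed only by 'b's; objective: faster (asymptotic, O(n^3) → O(n)).

-- ===== PORT A =====
-- all index accesses are at indices 0 ≤ k < cs.length, where getD equals Python's s[k]
def pvGetc (cs : List Char) (k : Nat) : Char := cs.getD k '?'

-- 'for k in range(i+1, j): if s[k] != 'b': valid = False; break' (called with k = i+1)
def aLoopK (cs : List Char) (k j : Nat) : Bool :=
  if k < j then (if pvGetc cs k ≠ 'b' then false else aLoopK cs (k+1) j) else true
  termination_by j - k

-- 'for j in range(i+1, n): …' ; the slice input_str[i:j+1] with 0 ≤ i < j+1 ≤ n is (drop i).take (j+1-i)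
def aLoopJ (cs : List Char) (i j : Nat) (best : List Char) : List Char :=
  if j < cs.length then
    if pvGetc cs j ≠ 'a' then aLoopJ cs i (j+1) best
    else
      let best' := if aLoopK cs (i+1) j then
          let cand := (cs.drop i).take (j + 1 - i)
          if cand.length > best.length then cand else best
        else best
      aLoopJ cs i (j+1) best'
  else best
  termination_by cs.length - j

-- 'for i in range(n): …'
def aLoopI (cs : List Char) (i : Nat) (best : List Char) : List Char :=
  if i < cs.length then
    if pvGetc cs i ≠ 'a' then aLoopI cs (i+1) best
    else aLoopI cs (i+1) (aLoopJ cs i (i+1) best)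
  else best
  termination_by cs.length - i

def regex_a_b_star_a_matcher (input_str : String) : String :=
  let cs := input_str.toList
  if cs.isEmpty then "" else String.mk (aLoopI cs 0 [])

-- ===== PORT B =====
-- 'for j, c in enumerate(input_str): …' consuming the characters with a position counter
def bLoop : List Char → Nat → Nat × Nat → Option Nat → Nat × Nat
  | [], _, best, _ => best
  | c :: rest, j, best, start =>
    if c = 'a' then
      let best' := match start with
        | some s => if j - s + 1 > best.1 then (j - s + 1, s) else best
        | none => best
      bLoop rest (j+1) best' (some j)
    else if c ≠ 'b' then bLoop rest (j+1) best none
    else bLoop rest (j+1) best start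

def regex_a_b_star_a_matcher_alt (input_str : String) : String :=
  let cs := input_str.toList
  let best := bLoop cs 0 (0, 0) none
  -- input_str[s:s+length] with 0 ≤ s, s+length ≤ n is (drop s).take length
  String.mk ((cs.drop best.2).take ((best.2 + best.1) - best.2))

-- ===== PRECONDITION & SPEC =====
def Spec_regex_a_b_star_a_matcher (input_str : String) (out : String) : Prop := out = regex_a_b_star_a_matcher_alt input_str
instance (input_str : String) (out : String) : Decidable (Spec_regex_a_b_star_a_matcher input_str out) := by unfold Spec_regex_a_b_star_a_matcher; infer_instance

-- ===== CLAIM (what is proved, stated in full; the proofs are below) =====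
def Claim_equal_regex_a_b_star_a_matcher : Prop := ∀ (input_str : String), Dom_regex_a_b_star_a_matcher input_str → Spec_regex_a_b_star_a_matcher input_str (regex_a_b_star_a_matcher input_str)

-- ===== LEMMAS AND PROOFS =====

-- first index e ≥ i with cs[e] = 'a' reachable through 'b's only
def scanEnd (cs : List Char) (i : Nat) : Option Nat :=
  if i < cs.length then
    (if pvGetc cs i = 'a' then some i
     else if pvGetc cs i = 'b' then scanEnd cs (i+1) else none)
  else none
  termination_by cs.length - i

-- render a (length, start) pair as the substring
def render (cs : List Char) (b : Nat × Nat) : List Char := (cs.drop b.2).take b.1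

-- B's best-update on (length, start) pairs
def updP (b : Nat × Nat) (s e : Nat) : Nat × Nat := if e - s + 1 > b.1 then (e - s + 1, s) else b

-- A's best-update on rendered strings
def updL (cs : List Char) (best : List Char) (s e : Nat) : List Char :=
  let cand := (cs.drop s).take (e + 1 - s)
  if cand.length > best.length then cand else best

-- the pending candidate B has not yet closed: last open 'a' plus its forward end, if any
def pend (cs : List Char) (i : Nat) (start : Option Nat) (b : Nat × Nat) : Nat × Nat :=
  match start with
  | some s => match scanEnd cs i with
    | some e => updP b s e
    | none => b
  | none => b

theorem aLoopK_iff (cs : List Char) (j k : Nat) :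
    aLoopK cs k j = true ↔ ∀ m, k ≤ m → m < j → pvGetc cs m = 'b' := by
  induction hd : j - k using Nat.strongRecOn generalizing k with
  | _ d ih =>
  subst hd
  rw [aLoopK]
  split
  · rename_i h
    split
    · rename_i hb
      exact iff_of_false (by simp) fun hall => hb (hall k le_rfl h)
    · rename_i hb
      push_neg at hb
      rw [ih (j - (k+1)) (by omega) (k+1) rfl]
      constructor
      · intro hall m hm1 hm2
        rcases Nat.eq_or_lt_of_le hm1 with h1 | h1
        · simpa [← h1] using hb
        · exact hall m h1 hm2
      · intro hall m hm1 hm2; exact hall m (by omega) hm2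
  · rename_i h
    simp only [true_iff]
    intro m hm1 hm2; omega

theorem aLoopJ_noupd (cs : List Char) (i j : Nat) (best : List Char)
    (hw : ∃ k, i < k ∧ k < j ∧ pvGetc cs k ≠ 'b') : aLoopJ cs i j best = best := by
  induction hd : cs.length - j using Nat.strongRecOn generalizing j with
  | _ d ih =>
  subst hd
  obtain ⟨k, hk1, hk2, hk3⟩ := hw
  rw [aLoopJ]
  split
  · rename_i hjn
    split
    · exact ih (cs.length - (j+1)) (by omega) (j+1) ⟨k, hk1, by omega, hk3⟩ rfl
    · have hK : aLoopK cs (i+1) j = false := by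
        cases h : aLoopK cs (i+1) j
        · rfl
        · exact absurd ((aLoopK_iff cs j (i+1)).mp h k (by omega) hk2) hk3
      simp only [hK]
      exact ih (cs.length - (j+1)) (by omega) (j+1) ⟨k, hk1, by omega, hk3⟩ rfl
  · rfl

theorem scanEnd_bounds (cs : List Char) (i e : Nat) (he : scanEnd cs i = some e) :
    i ≤ e ∧ e < cs.length := by
  induction hd : cs.length - i using Nat.strongRecOn generalizing i with
  | _ d ih =>
  subst hd
  rw [scanEnd] at he
  split at he
  · rename_i hin
    split at he
    · cases he; omega
    · split at he
      · have := ih (cs.length - (i+1)) (by omega) (i+1) he rfl; omega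
      · cases he
  · cases he

theorem aLoopJ_scan (cs : List Char) (i j : Nat) (best : List Char) (hij : i < j)
    (hinv : ∀ m, i < m → m < j → pvGetc cs m = 'b') :
    aLoopJ cs i j best = (match scanEnd cs j with
      | some e => updL cs best i e
      | none => best) := by
  induction hd : cs.length - j using Nat.strongRecOn generalizing j best with
  | _ d ih =>
  subst hd
  rw [aLoopJ]
  by_cases hjn : j < cs.length
  · rw [if_pos hjn]
    by_cases ha : pvGetc cs j = 'a'
    · have hs : scanEnd cs j = some j := by rw [scanEnd]; simp [hjn, ha]
      have hK : aLoopK cs (i+1) j = true :=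
        (aLoopK_iff cs j (i+1)).mpr (fun m h1 h2 => hinv m (by omega) h2)
      rw [if_neg (not_not_intro ha), hs]
      simp only [hK, if_true]
      rw [aLoopJ_noupd cs i (j+1) _ ⟨j, hij, by omega, by simp [ha]⟩]
      simp [updL]
    · rw [if_pos ha]
      by_cases hb : pvGetc cs j = 'b'
      · have hs : scanEnd cs j = scanEnd cs (j+1) := by rw [scanEnd]; simp [hjn, ha, hb]
        rw [hs]
        exact ih (cs.length - (j+1)) (by omega) (j+1) best (by omega)
          (fun m h1 h2 => by
            rcases Nat.lt_or_ge m j with h | h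
            · exact hinv m h1 h
            · have hm : m = j := by omega
              simpa [hm] using hb) rfl
      · have hs : scanEnd cs j = none := by rw [scanEnd]; simp [hjn, ha, hb]
        rw [hs]
        exact aLoopJ_noupd cs i (j+1) best ⟨j, hij, by omega, hb⟩
  · rw [if_neg hjn]
    have hs : scanEnd cs j = none := by rw [scanEnd]; simp [hjn]
    rw [hs]

theorem render_updP (cs : List Char) (b : Nat × Nat) (s e : Nat)
    (hwf : b.2 + b.1 ≤ cs.length) (hse : s ≤ e) (hen : e < cs.length) :
    render cs (updP b s e) = updL cs (render cs b) s e := by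
  have hlb : (render cs b).length = b.1 := by
    simp [render]; omega
  have hlc : ((cs.drop s).take (e + 1 - s)).length = e + 1 - s := by
    simp; omega
  simp only [updP, updL, hlb, hlc]
  have h1 : e + 1 - s = e - s + 1 := by omega
  rw [h1]
  split <;> simp [render, h1]

theorem bLoop_drop (cs : List Char) (i : Nat) (b : Nat × Nat) (start : Option Nat)
    (hwf : b.2 + b.1 ≤ cs.length) (hst : ∀ s, start = some s → s ≤ i) :
    aLoopI cs i (render cs (pend cs i start b)) = render cs (bLoop (cs.drop i) i b start) := by
  induction hd : cs.length - i using Nat.strongRecOn generalizing i b start with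
  | _ d ih =>
  subst hd
  rw [aLoopI]
  by_cases hin : i < cs.length
  · have hdrop : cs.drop i = cs[i] :: cs.drop (i+1) := List.drop_eq_getElem_cons hin
    have hget : pvGetc cs i = cs[i] := by simp [pvGetc, List.getD_eq_getElem?_getD, hin]
    rw [if_pos hin, hdrop]
    simp only [bLoop]
    by_cases ha : cs[i] = 'a'
    · -- the 'a' step: B closes the pending candidate, A's pending candidate at i is (start, i)
      rw [if_neg (by simp [hget, ha]), if_pos ha]
      have hscan_i : scanEnd cs i = some i := by
        rw [scanEnd]; simp [hin, hget, ha]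
      set b' := (match start with
        | some s => if i - s + 1 > b.1 then (i - s + 1, s) else b
        | none => b) with hb'
      have hpend : pend cs i start b = b' := by
        cases start with
        | none => simp [pend, hb']
        | some s => simp [pend, hscan_i, updP, hb']
      have hwf' : b'.2 + b'.1 ≤ cs.length := by
        cases start with
        | none => simpa [hb'] using hwf
        | some s =>
          have hs : s ≤ i := hst s rfl
          simp only [hb']
          split
          · simp; omega
          · exact hwf
      have hJ : aLoopJ cs i (i+1) (render cs b') =
          render cs (pend cs (i+1) (some i) b') := by
        rw [aLoopJ_scan cs i (i+1) _ (by omega) (fun m h1 h2 => by omega)]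
        simp only [pend]
        cases hse : scanEnd cs (i+1) with
        | none => rfl
        | some e =>
          have hbd := scanEnd_bounds cs (i+1) e hse
          rw [render_updP cs b' i e hwf' (by omega) hbd.2]
      rw [hpend, hJ, ih (cs.length - (i+1)) (by omega) (i+1) b' (some i) hwf'
        (fun s hs => by cases hs; omega) rfl]
    · rw [if_pos (by simp [hget, ha]), if_neg (by simp [hget, ha])]
      by_cases hbch : cs[i] = 'b'
      · -- a 'b': the pending candidate is unchanged
        rw [if_neg (by simp [hget, hbch])]
        have hscan : scanEnd cs i = scanEnd cs (i+1) := by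
          rw [scanEnd]; simp [hin, hget, ha, hbch]
        have hpend : pend cs i start b = pend cs (i+1) start b := by
          cases start <;> simp [pend, hscan]
        rw [hpend, ih (cs.length - (i+1)) (by omega) (i+1) b start hwf
          (fun s hs => by have := hst s hs; omega) rfl]
      · -- neither 'a' nor 'b': the pending candidate dies
        rw [if_pos (by simp [hget, hbch])]
        have hscan : scanEnd cs i = none := by
          rw [scanEnd]; simp [hin, hget, ha, hbch]
        have hpend : pend cs i start b = b := by
          cases start <;> simp [pend, hscan]
        have hpend' : pend cs (i+1) none b = b := by simp [pend]
        have hI := ih (cs.length - (i+1)) (by omega) (i+1) b none hwf (by simp) rfl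
        rw [hpend'] at hI
        rw [hpend]
        exact hI
  · rw [if_neg hin]
    have hdrop : cs.drop i = [] := List.drop_eq_nil_of_le (by omega)
    rw [hdrop, bLoop]
    have hscan : scanEnd cs i = none := by rw [scanEnd]; simp [hin]
    cases start <;> simp [pend, hscan]

-- ===== VERDICT (by name: the statement is the Claim_ definition above) =====
theorem regex_a_b_star_a_matcher_spec : Claim_equal_regex_a_b_star_a_matcher := by
  intro input_str _
  unfold Spec_regex_a_b_star_a_matcher regex_a_b_star_a_matcher regex_a_b_star_a_matcher_alt
  set cs := input_str.toList with hcs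
  have hmain := bLoop_drop cs 0 (0, 0) none (by simp) (by simp)
  simp only [pend, render, List.drop_zero] at hmain ⊢
  by_cases hnil : cs.isEmpty
  · have h0 : cs = [] := List.isEmpty_iff.mp hnil
    rw [if_pos hnil, h0]
    rfl
  · rw [if_neg hnil]
    have harith : (bLoop cs 0 (0, 0) none).2 + (bLoop cs 0 (0, 0) none).1 - (bLoop cs 0 (0, 0) none).2
        = (bLoop cs 0 (0, 0) none).1 := by omega
    rw [harith, ← hmain]
    congr 1
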